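-- pv_equiv track=rewrite | github.com/c240030/openArchiveCTF | 2025/tohctf2025/RSA Recycle/text_decoder.py | int_to_8bit_text
-- ===== SOURCE A (Python) =====
-- def int_to_8bit_text(m):
--     """Convert integer to standard 8-bit ASCII text"""
--     try:
--         bits = bin(m)[2:]
--         # Pad to multiple of 8
--         bits = bits.zfill((len(bits) + 7) // 8 * 8)
--         result = ''.join(chr(int(bits[i:i+8], 2)) for i in range(0, len(bits), 8))
--         return result
--     except (ValueError, OverflowError):
--         return "Cannot decode as 8-bit ASCII"
-- ===== SOURCE B (Python) =====
-- def int_to_8bit_text(m):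
--     """Convert integer to standard 8-bit ASCII text"""
--     if m < 0:
--         return "Cannot decode as 8-bit ASCII"
--     out = []
--     while m > 0:
--         out.append(chr(m & 0xFF))
--         m >>= 8
--     return ''.join(reversed(out)) or '\x00'
-- ===== Notes on version B (the rewrite author's own statement) =====
-- stated objective: simpler
-- what changed: B extracts the bytes of the integer directly with arithmetic (m & 0xFF, m >>= 8) and joins them in reverse, instead of building a bin() string, zero-padding it to a whole number of bytes and re-parsing each eight-character slice with int(.,2); negatives are rejected up front instead of relying on a parse failure of the stray 'b' from bin().
-- intended difference: For negative m whose absolute value has a bit length that is six more than a multiple of eight, the stray 'b' from bin(-m) lands so that A's first slice reads as a valid '0b'-prefixed binary literal and A returns an accidental decoded string (its witness is m = -32, where A returns ' '); B returns the fallback 'Cannot decode as 8-bit ASCII' as on every other negative input, which is the intended behaviour. — e.g. on int_to_8bit_text(-32): A returns " ", B returns "Cannot decode as 8-bit ASCII"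
import Mathlib
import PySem

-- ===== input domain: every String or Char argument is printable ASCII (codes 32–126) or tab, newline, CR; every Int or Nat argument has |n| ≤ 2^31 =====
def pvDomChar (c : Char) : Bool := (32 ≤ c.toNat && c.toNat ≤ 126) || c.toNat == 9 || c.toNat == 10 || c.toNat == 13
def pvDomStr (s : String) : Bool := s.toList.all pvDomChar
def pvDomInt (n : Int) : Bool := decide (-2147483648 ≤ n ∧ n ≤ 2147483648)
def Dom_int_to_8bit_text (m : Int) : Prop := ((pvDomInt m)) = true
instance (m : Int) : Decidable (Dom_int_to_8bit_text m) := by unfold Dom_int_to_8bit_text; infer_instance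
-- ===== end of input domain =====

-- B rebuilds the text from the integer's bytes with arithmetic instead of A's bin()-string
-- padding/slicing/re-parsing (objective: simpler); on negatives whose |m| has bit_length ≡ 6 (mod 8)
-- A accidentally decodes through the stray 'b' of bin() while B returns the fallback string (see D_ below).

-- ===== PORT A =====
-- one loop step of A's ''.join(chr(int(bits[i:i+8], 2)) for i in range(0, len(bits), 8)):
-- the Option accumulator is 'no exception so far'; a ValueError from int(.,2) is none.
-- chr(v) is Char.ofNat v.toNat: exact here, every successfully parsed slice value is in 0..255.
def pyChunkStep (bits : List Char) (acc : Option (List Char)) (i : Int) : Option (List Char) :=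
  match acc with
  | none => none
  | some a =>
    match PySem.Int.ofCharsBase? (PySem.List.slice bits (some i) (some (i + 8))) 2 with
    | none => none
    | some v => some (a ++ [Char.ofNat v.toNat])

def int_to_8bit_text (m : Int) : String :=
  -- bits = bin(m)[2:]
  let bits0 := PySem.List.slice (PySem.Int.toBinChars0b m) (some 2) none
  -- bits = bits.zfill((len(bits) + 7) // 8 * 8)
  let bits := PySem.Chars.zfill bits0 (PySem.Int.floordiv ((bits0.length : Int) + 7) 8 * 8)
  match (PySem.List.pyRange 0 (bits.length : Int) 8).foldl (pyChunkStep bits) (some []) with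
  | some cs => String.ofList cs
  | none => "Cannot decode as 8-bit ASCII"

-- ===== PORT B =====
-- the while-loop 'while m > 0: out.append(chr(m & 0xFF)); m >>= 8', fuel = initial m (m shrinks each step)
def altBytesLELoop : Nat → Nat → List Char
  | 0, _ => []
  | fuel + 1, n => if n = 0 then [] else Char.ofNat (n % 256) :: altBytesLELoop fuel (n / 256)

def altBytesLE (n : Nat) : List Char := altBytesLELoop n n

def int_to_8bit_text_alt (m : Int) : String :=
  if m < 0 then "Cannot decode as 8-bit ASCII"
  else
    let cs := (altBytesLE m.toNat).reverse   -- ''.join(reversed(out))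
    if cs.isEmpty then String.ofList [Char.ofNat 0] else String.ofList cs   -- … or '\x00'

-- ===== PRECONDITION & SPEC =====
-- For negative m whose |m| has bit_length ≡ 6 (mod 8), bin(-m)'s stray 'b' lands so that A's first
-- 8-char slice reads '0b……', which int(.,2) accepts as a base prefix: A returns an accidental decoded
-- string (e.g. A(-32) = ' '); B returns the fallback "Cannot decode as 8-bit ASCII" as on every other
-- negative input, which is the intended behaviour.
def D_int_to_8bit_text (m : Int) : Prop := m < 0 ∧ PySem.Int.bitLength m % 8 = 6
instance (m : Int) : Decidable (D_int_to_8bit_text m) := by unfold D_int_to_8bit_text; infer_instance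

def Spec_int_to_8bit_text (m : Int) (out : String) : Prop :=
  ¬ D_int_to_8bit_text m → out = int_to_8bit_text_alt m
instance (m : Int) (out : String) : Decidable (Spec_int_to_8bit_text m out) := by
  unfold Spec_int_to_8bit_text; infer_instance

def pvDiffWitness_int_to_8bit_text : Int := -32
def pvDiffWitnessOut_int_to_8bit_text : String × String := (" ", "Cannot decode as 8-bit ASCII")

-- ===== CLAIM (what is proved, stated in full; the proofs are below) =====
def Claim_unchanged_int_to_8bit_text : Prop :=
  ∀ (m : Int), Dom_int_to_8bit_text m → Spec_int_to_8bit_text m (int_to_8bit_text m)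
def Claim_changed_int_to_8bit_text : Prop :=
  Dom_int_to_8bit_text (pvDiffWitness_int_to_8bit_text) ∧
  D_int_to_8bit_text (pvDiffWitness_int_to_8bit_text) ∧
  int_to_8bit_text (pvDiffWitness_int_to_8bit_text) = pvDiffWitnessOut_int_to_8bit_text.1 ∧
  int_to_8bit_text_alt (pvDiffWitness_int_to_8bit_text) = pvDiffWitnessOut_int_to_8bit_text.2 ∧
  pvDiffWitnessOut_int_to_8bit_text.1 ≠ pvDiffWitnessOut_int_to_8bit_text.2
def Claim_exact_int_to_8bit_text : Prop :=
  ∀ (m : Int), Dom_int_to_8bit_text m → D_int_to_8bit_text m →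
    int_to_8bit_text m ≠ int_to_8bit_text_alt m

-- ===== LEMMAS AND PROOFS =====

-- n written in exactly k binary digits (MSB first), i.e. bin(n) zero-padded/truncated to width k
def bitsP : Nat → Nat → List Char
  | _, 0 => []
  | n, k + 1 => bitsP (n / 2) k ++ [if n % 2 = 1 then '1' else '0']

-- n written in exactly L big-endian bytes (as chars)
def bytesBE : Nat → Nat → List Char
  | _, 0 => []
  | n, L + 1 => Char.ofNat (n / 2 ^ (8 * L)) :: bytesBE (n % 2 ^ (8 * L)) L

theorem length_bitsP (k : Nat) : ∀ n, (bitsP n k).length = k := by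
  induction k with
  | zero => intro n; rfl
  | succ k ih => intro n; simp [bitsP, ih]

theorem length_bytesBE (L : Nat) : ∀ n, (bytesBE n L).length = L := by
  induction L with
  | zero => intro n; rfl
  | succ L ih => intro n; simp [bytesBE, ih]

theorem bitsP_split (a b : Nat) : ∀ n, bitsP n (a + b) = bitsP (n / 2 ^ b) a ++ bitsP (n % 2 ^ b) b := by
  induction b with
  | zero => intro n; simp [bitsP]
  | succ b ih =>
    intro n
    have h1 : a + (b + 1) = (a + b) + 1 := by omega
    rw [h1]
    show bitsP (n / 2) (a + b) ++ [if n % 2 = 1 then '1' else '0'] = _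
    rw [ih (n / 2)]
    have h2 : n / 2 / 2 ^ b = n / 2 ^ (b + 1) := by
      rw [Nat.div_div_eq_div_mul, pow_succ']
    have h3 : n / 2 % 2 ^ b = n % 2 ^ (b + 1) / 2 := by
      rw [pow_succ]
      rw [Nat.mod_mul_left_div_self]  -- guess; fix if wrong
    have h4 : n % 2 = n % 2 ^ (b + 1) % 2 := by
      rw [Nat.mod_mod_of_dvd _ (dvd_pow_self 2 (by omega))]
    rw [h2, h3, h4]
    simp [bitsP, List.append_assoc]

theorem bitsP_zero (k : Nat) : bitsP 0 k = List.replicate k '0' := by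
  induction k with
  | zero => rfl
  | succ k ih => simp [bitsP, ih, List.replicate_succ']

theorem bitsP_pad (n k e : Nat) (h : n < 2 ^ k) :
    bitsP n (e + k) = List.replicate e '0' ++ bitsP n k := by
  rw [bitsP_split e k n, Nat.div_eq_of_lt h, Nat.mod_eq_of_lt h, bitsP_zero]

theorem mem_bitsP (k : Nat) : ∀ n c, c ∈ bitsP n k → c = '0' ∨ c = '1' := by
  induction k with
  | zero => intro n c h; simp [bitsP] at h
  | succ k ih =>
    intro n c h
    simp [bitsP] at h
    rcases h with h | h
    · exact ih _ _ h
    · split at h <;> simp [h]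

-- characterization of core's Nat.toDigits at base 2
def binDigits (n : Nat) : List Char :=
  if n < 2 then [Nat.digitChar n] else binDigits (n / 2) ++ [Nat.digitChar (n % 2)]
termination_by n
decreasing_by exact Nat.div_lt_self (by omega) (by omega)

theorem toDigitsCore_two (f : Nat) : ∀ n acc, 0 < f → n < 2 ^ f →
    Nat.toDigitsCore 2 f n acc = binDigits n ++ acc := by
  induction f with
  | zero => intro n acc h; omega
  | succ f ih =>
    intro n acc _ hn
    show (if n / 2 = 0 then Nat.digitChar (n % 2) :: acc
          else Nat.toDigitsCore 2 f (n / 2) (Nat.digitChar (n % 2) :: acc)) = _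
    by_cases h2 : n / 2 = 0
    · have hn2 : n < 2 := by omega
      rw [if_pos h2, binDigits]
      rw [if_pos hn2]
      have : n % 2 = n := Nat.mod_eq_of_lt hn2
      simp [this]
    · have hf : 0 < f := by
        by_contra h
        have : f = 0 := by omega
        subst this
        omega
      have hlt : n / 2 < 2 ^ f := by
        rw [Nat.div_lt_iff_lt_mul (by omega : 0 < 2)]
        rw [← pow_succ]
        exact hn
      rw [if_neg h2, ih (n / 2) _ hf hlt]
      conv_rhs => rw [binDigits]
      rw [if_neg (by omega : ¬ n < 2)]
      simp

theorem toDigits_two (n : Nat) : Nat.toDigits 2 n = binDigits n := by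
  have h : n < 2 ^ (n + 1) :=
    lt_of_lt_of_le Nat.lt_two_pow_self (Nat.pow_le_pow_right (by omega) (by omega))
  have : Nat.toDigits 2 n = Nat.toDigitsCore 2 (n + 1) n [] := rfl
  rw [this, toDigitsCore_two (n + 1) n [] (by omega) h, List.append_nil]

theorem binDigits_eq_bitsP (n : Nat) (h : 0 < n) :
    binDigits n = bitsP n (PySem.Int.bitLength (n : Int)) := by
  induction n using Nat.strong_induction_on with
  | _ n ih =>
    rw [PySem.Int.bitLength_natCast h]
    by_cases h2 : n < 2
    · have : n = 1 := by omega
      subst this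
      simp [binDigits, bitsP, PySem.Int.bitLength_zero]
      decide
    · rw [binDigits, if_neg h2]
      have hpos : 0 < n / 2 := by omega
      rw [ih (n / 2) (Nat.div_lt_self h (by omega)) hpos]
      show _ = bitsP (n / 2) _ ++ [if n % 2 = 1 then '1' else '0']
      congr 1
      rcases Nat.mod_two_eq_zero_or_one n with hp | hp <;> simp [hp, Nat.digitChar]

set_option maxHeartbeats 1000000 in
set_option maxRecDepth 10000 in
theorem parse8 : ∀ v, v < 256 → PySem.Int.ofCharsBase? (bitsP v 8) 2 = some (v : Int) := by decide

set_option maxHeartbeats 1000000 in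
set_option maxRecDepth 10000 in
theorem parseBad : ∀ p, p < 8 → p ≠ 1 → ∀ x, x < 2 ^ (7 - p) →
    PySem.Int.ofCharsBase? (List.replicate p '0' ++ 'b' :: bitsP x (7 - p)) 2 = none := by decide

set_option maxHeartbeats 1000000 in
set_option maxRecDepth 10000 in
theorem parse6 : ∀ v, v < 64 → PySem.Int.ofCharsBase? ('0' :: 'b' :: bitsP v 6) 2 = some (v : Int) := by decide

theorem zfill_nosign (cs : List Char) (w : Int)
    (hne : cs ≠ []) (hh : cs.head hne ≠ '+' ∧ cs.head hne ≠ '-') :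
    PySem.Chars.zfill cs w = List.replicate (w.toNat - cs.length) '0' ++ cs := by
  obtain ⟨c, rest, rfl⟩ := List.exists_cons_of_ne_nil hne
  simp only [List.head_cons] at hh
  rw [PySem.Chars.zfill]
  by_cases hw : w ≤ (c :: rest).length
  · rw [if_pos hw]
    have h' : w.toNat ≤ (c :: rest).length := Int.toNat_le.mpr hw
    have : w.toNat - (c :: rest).length = 0 := by omega
    rw [this]
    simp
  · rw [if_neg hw]
    have : ¬ (c = '+' ∨ c = '-') := by tauto
    simp only [this, ite_false]

theorem bytesBE_snoc (L : Nat) : ∀ n, n < 2 ^ (8 * (L + 1)) →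
    bytesBE n (L + 1) = bytesBE (n / 256) L ++ [Char.ofNat (n % 256)] := by
  induction L with
  | zero =>
    intro n hn
    show Char.ofNat (n / 2 ^ (8 * 0)) :: bytesBE (n % 2 ^ (8 * 0)) 0 = _
    have h1 : n / 2 ^ (8 * 0) = n := by norm_num
    have h2 : n % 256 = n := Nat.mod_eq_of_lt (by norm_num at hn ⊢; omega)
    have h3 : n / 256 = 0 := Nat.div_eq_of_lt (by norm_num at hn ⊢; omega)
    simp [bytesBE, h2]
  | succ L ih =>
    intro n hn
    show Char.ofNat (n / 2 ^ (8 * (L + 1))) :: bytesBE (n % 2 ^ (8 * (L + 1))) (L + 1) = _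
    rw [ih (n % 2 ^ (8 * (L + 1))) (Nat.mod_lt _ (by positivity))]
    have e1 : n % 2 ^ (8 * (L + 1)) % 256 = n % 256 := by
      apply Nat.mod_mod_of_dvd
      have e : (2:Nat) ^ (8 * (L + 1)) = 256 * 2 ^ (8 * L) := by
        rw [show 8 * (L + 1) = 8 + 8 * L by ring, pow_add]; norm_num
      exact ⟨2 ^ (8 * L), e⟩
    have e2 : n % 2 ^ (8 * (L + 1)) / 256 = n / 256 % 2 ^ (8 * L) := by
      have : (2 : Nat) ^ (8 * (L + 1)) = 256 * 2 ^ (8 * L) := by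
        rw [show 8 * (L + 1) = 8 + 8 * L by ring, pow_add]
        norm_num
      rw [this, Nat.mod_mul_right_div_self]
    have e3 : n / 2 ^ (8 * (L + 1)) = n / 256 / 2 ^ (8 * L) := by
      rw [Nat.div_div_eq_div_mul]
      congr 1
      rw [show 8 * (L + 1) = 8 + 8 * L by ring, pow_add]
      norm_num
    rw [e1, e2, e3]
    show _ = Char.ofNat (n / 256 / 2 ^ (8 * L)) :: bytesBE (n / 256 % 2 ^ (8 * L)) L ++ _
    simp

theorem altLoop_zero (f : Nat) : altBytesLELoop f 0 = [] := by
  cases f <;> simp [altBytesLELoop]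

theorem alt_rev (L : Nat) : ∀ n f, n ≤ f → 2 ^ (8 * L) ≤ n → n < 2 ^ (8 * (L + 1)) →
    (altBytesLELoop f n).reverse = bytesBE n (L + 1) := by
  induction L with
  | zero =>
    intro n f hf h1 h2
    norm_num at h1 h2
    obtain ⟨f, rfl⟩ : ∃ f', f = f' + 1 := ⟨f - 1, by omega⟩
    show ((if n = 0 then [] else Char.ofNat (n % 256) :: altBytesLELoop f (n / 256))).reverse = _
    rw [if_neg (by omega)]
    have : n / 256 = 0 := Nat.div_eq_of_lt (by omega)
    rw [this, altLoop_zero]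
    have : n % 256 = n := Nat.mod_eq_of_lt (by omega)
    rw [this]
    show [Char.ofNat n] = Char.ofNat (n / 2 ^ (8 * 0)) :: bytesBE (n % 2 ^ (8 * 0)) 0
    norm_num [bytesBE]
  | succ L ih =>
    intro n f hf h1 h2
    have hn : 256 ≤ n := le_trans (by calc (256:Nat) = 2^8 := by norm_num
                                          _ ≤ 2 ^ (8 * (L+1)) := Nat.pow_le_pow_right (by omega) (by omega)) h1
    obtain ⟨f, rfl⟩ : ∃ f', f = f' + 1 := ⟨f - 1, by omega⟩
    show ((if n = 0 then [] else Char.ofNat (n % 256) :: altBytesLELoop f (n / 256))).reverse = _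
    rw [if_neg (by omega)]
    rw [List.reverse_cons]
    have hd1 : 2 ^ (8 * L) ≤ n / 256 := by
      rw [Nat.le_div_iff_mul_le (by omega : 0 < 256)]
      calc 2 ^ (8 * L) * 256 = 2 ^ (8 * (L + 1)) := by
            rw [show 8 * (L + 1) = 8 * L + 8 by ring, pow_add]; norm_num
        _ ≤ n := h1
    have hd2 : n / 256 < 2 ^ (8 * (L + 1)) := by
      rw [Nat.div_lt_iff_lt_mul (by omega : 0 < 256)]
      calc n < 2 ^ (8 * (L + 1 + 1)) := h2
        _ = 2 ^ (8 * (L + 1)) * 256 := by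
            rw [show 8 * (L + 1 + 1) = 8 * (L + 1) + 8 by ring, pow_add]; norm_num
    rw [ih (n / 256) f (by omega) hd1 hd2]
    rw [bytesBE_snoc (L + 1) n h2]

theorem foldl_chunk_none (bits : List Char) (f : Nat → Int) :
    ∀ l : List Nat, l.foldl (fun acc k => pyChunkStep bits acc (f k)) none = none := by
  intro l; induction l with
  | nil => rfl
  | cons x l ih => simpa [pyChunkStep] using ih

theorem slice8 (full : List Char) (j : Nat) :
    PySem.List.slice full (some (j : Int)) (some ((j : Int) + 8)) = (full.drop j).take 8 := by
  have h := PySem.List.slice_natCast_add full j 8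
  have : ((8 : Nat) : Int) = (8 : Int) := by norm_num
  rw [this] at h
  exact h

theorem fold_pref (C : Nat) : ∀ (n : Nat) (o : Int) (pre suffix a : List Char),
    n < 2 ^ (8 * C) → o = (pre.length : Int) →
    (List.range C).foldl
      (fun acc (k : Nat) => pyChunkStep (pre ++ (bitsP n (8 * C) ++ suffix)) acc (o + 8 * (k : Int)))
      (some a)
      = some (a ++ bytesBE n C) := by
  induction C with
  | zero =>
    intro n o pre suffix a _ _
    simp [bytesBE]
  | succ C ih =>
    intro n o pre suffix a hn ho
    have hsplit : bitsP n (8 * (C + 1)) = bitsP (n / 256) (8 * C) ++ bitsP (n % 256) 8 := by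
      have h1 : 8 * (C + 1) = 8 * C + 8 := by ring
      rw [h1, bitsP_split (8 * C) 8 n]
      norm_num
    have hfull : pre ++ (bitsP n (8 * (C + 1)) ++ suffix)
        = pre ++ (bitsP (n / 256) (8 * C) ++ (bitsP (n % 256) 8 ++ suffix)) := by
      rw [hsplit, List.append_assoc]
    rw [hfull, List.range_succ, List.foldl_append]
    have hdiv : n / 256 < 2 ^ (8 * C) := by
      rw [Nat.div_lt_iff_lt_mul (by omega : 0 < 256)]
      calc n < 2 ^ (8 * (C + 1)) := hn
        _ = 2 ^ (8 * C) * 256 := by rw [show 8 * (C+1) = 8 * C + 8 by ring, pow_add]; norm_num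
    rw [ih (n / 256) o pre (bitsP (n % 256) 8 ++ suffix) a hdiv ho]
    rw [List.foldl_cons, List.foldl_nil]
    rw [pyChunkStep]
    have hidx : o + 8 * (C : Int) = ((pre.length + 8 * C : Nat) : Int) := by
      rw [ho]; push_cast; ring
    rw [hidx, slice8]
    have hdrop : (pre ++ (bitsP (n / 256) (8 * C) ++ (bitsP (n % 256) 8 ++ suffix))).drop (pre.length + 8 * C)
        = bitsP (n % 256) 8 ++ suffix := by
      rw [List.drop_append, List.drop_of_length_le (by omega), List.nil_append]
      have e : pre.length + 8 * C - pre.length = 8 * C := by omega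
      rw [e, List.drop_left' (length_bitsP (8 * C) (n / 256))]
    rw [hdrop]
    have htake : (bitsP (n % 256) 8 ++ suffix).take 8 = bitsP (n % 256) 8 :=
      List.take_left' (length_bitsP 8 (n % 256))
    rw [htake, parse8 (n % 256) (Nat.mod_lt _ (by omega))]
    show some (a ++ bytesBE (n / 256) C ++ [Char.ofNat ((n % 256 : Nat) : Int).toNat]) = _
    rw [Int.toNat_natCast, bytesBE_snoc C n hn, ← List.append_assoc]

theorem main_pos (m : Int) (hm : 0 < m) : int_to_8bit_text m = int_to_8bit_text_alt m := by
  have hn0 : 0 < m.toNat := by omega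
  set n := m.toNat with hndef
  set ℓ := PySem.Int.bitLength (n : Int) with hldef
  have hnl : n < 2 ^ ℓ := by
    have := PySem.Int.lt_two_pow_bitLength (n : Int)
    simpa using this
  have hlpos : 0 < ℓ := by
    by_contra h
    have : ℓ = 0 := by omega
    rw [this] at hnl
    omega
  have hnge : 2 ^ (ℓ - 1) ≤ n := by
    have := PySem.Int.two_pow_bitLength_le (n : Int) (by exact_mod_cast (by omega : n ≠ 0))
    simpa using this
  set C := (ℓ + 7) / 8 with hCdef
  have hC1 : 1 ≤ C := by omega
  have hl8C : ℓ ≤ 8 * C := by omega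
  have hn8C : n < 2 ^ (8 * C) := lt_of_lt_of_le hnl (Nat.pow_le_pow_right (by omega) hl8C)
  -- A side
  have e0 : PySem.Int.toBinChars0b m = '0' :: 'b' :: Nat.toDigits 2 n := by
    rw [PySem.Int.toBinChars0b, if_neg (by omega)]
  have e1 : PySem.List.slice (PySem.Int.toBinChars0b m) (some 2) none = bitsP n ℓ := by
    rw [e0, PySem.List.slice_from _ (by norm_num : (0:Int) ≤ 2)]
    show List.drop 2 _ = _
    rw [List.drop_succ_cons, List.drop_one, List.tail_cons]
    rw [toDigits_two, binDigits_eq_bitsP n hn0]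
  have e2 : PySem.Int.floordiv ((ℓ : Int) + 7) 8 * 8 = ((8 * C : Nat) : Int) := by
    have h1 : ((ℓ : Int) + 7) = ((ℓ + 7 : Nat) : Int) := by push_cast; ring
    rw [h1, show (8:Int) = ((8:Nat):Int) by norm_num, PySem.Int.floordiv_natCast]
    push_cast
    omega
  have e3 : PySem.Chars.zfill (bitsP n ℓ) ((8 * C : Nat) : Int) = bitsP n (8 * C) := by
    have hne : bitsP n ℓ ≠ [] := by
      intro h
      have := length_bitsP ℓ n
      rw [h] at this
      simp at this
      omega
    have hhead : (bitsP n ℓ).head hne = '0' ∨ (bitsP n ℓ).head hne = '1' :=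
      mem_bitsP ℓ n _ (List.head_mem hne)
    rw [zfill_nosign _ _ hne ⟨by rcases hhead with h | h <;> simp [h], by rcases hhead with h | h <;> simp [h]⟩]
    rw [Int.toNat_natCast, length_bitsP]
    rw [← bitsP_pad n ℓ (8 * C - ℓ) hnl]
    congr 1
    omega
  have eA : int_to_8bit_text m = String.ofList (bytesBE n C) := by
    rw [int_to_8bit_text]
    simp only [e1, length_bitsP, e2, e3]
    rw [PySem.List.pyRange_of_pos _ _ (by norm_num : (0:Int) < 8)]
    have ecnt : (if (0:Int) < ((8 * C : Nat) : Int) then ((((8 * C : Nat) : Int) - 0 + 8 - 1) / 8).toNat else 0) = C := by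
      rw [if_pos (by push_cast; omega)]
      push_cast
      omega
    rw [ecnt, List.foldl_map]
    have hfull : bitsP n (8 * C) = [] ++ (bitsP n (8 * C) ++ []) := by simp
    rw [hfull, fold_pref C n 0 [] [] [] hn8C (by simp)]
    simp
  -- B side
  have eB : int_to_8bit_text_alt m = String.ofList (bytesBE n C) := by
    rw [int_to_8bit_text_alt, if_neg (by omega)]
    have h1 : 2 ^ (8 * (C - 1)) ≤ n :=
      le_trans (Nat.pow_le_pow_right (by omega) (by omega : 8 * (C - 1) ≤ ℓ - 1)) hnge
    have h2 : n < 2 ^ (8 * ((C - 1) + 1)) := by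
      rw [show (C - 1) + 1 = C by omega]
      exact hn8C
    have hrev := alt_rev (C - 1) n n le_rfl h1 h2
    rw [show (C - 1) + 1 = C by omega] at hrev
    show (if ((altBytesLE n).reverse).isEmpty then _ else _) = _
    rw [altBytesLE, hrev]
    have hlen : (bytesBE n C).length = C := length_bytesBE C n
    have : (bytesBE n C).isEmpty = false := by
      rw [List.isEmpty_eq_false_iff_exists_mem]
      rcases List.exists_mem_of_length_pos (by omega : 0 < (bytesBE n C).length) with ⟨x, hx⟩
      exact ⟨x, hx⟩
    rw [this]
    simp
  rw [eA, eB]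

theorem main_neg (m : Int) (hm : m < 0) (h6 : PySem.Int.bitLength m % 8 ≠ 6) :
    int_to_8bit_text m = "Cannot decode as 8-bit ASCII" := by
  have hk0 : 0 < m.natAbs := by omega
  set k := m.natAbs with hkdef
  have hmk : ((k : Nat) : Int) = -m := by omega
  have hbl : PySem.Int.bitLength (k : Int) = PySem.Int.bitLength m := by
    rw [hmk, PySem.Int.bitLength_neg]
  set ℓ := PySem.Int.bitLength (k : Int) with hldef
  have hnl : k < 2 ^ ℓ := by
    have := PySem.Int.lt_two_pow_bitLength (k : Int)
    simpa using this
  have hlpos : 0 < ℓ := by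
    by_contra h
    have : ℓ = 0 := by omega
    rw [this] at hnl
    omega
  have hnge : 2 ^ (ℓ - 1) ≤ k := by
    have := PySem.Int.two_pow_bitLength_le (k : Int) (by exact_mod_cast (by omega : k ≠ 0))
    simpa using this
  set C := (ℓ + 8) / 8 with hCdef
  have hC1 : 1 ≤ C := by omega
  set p := 8 * C - (ℓ + 1) with hpdef
  have hp7 : p ≤ 7 := by omega
  have hple : 7 - p ≤ ℓ := by omega
  have e0 : PySem.Int.toBinChars0b m = '-' :: '0' :: 'b' :: Nat.toDigits 2 k := by
    rw [PySem.Int.toBinChars0b, if_pos hm]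
  have e1 : PySem.List.slice (PySem.Int.toBinChars0b m) (some 2) none = 'b' :: bitsP k ℓ := by
    rw [e0, PySem.List.slice_from _ (by norm_num : (0:Int) ≤ 2)]
    show List.drop 2 _ = _
    rw [List.drop_succ_cons, List.drop_one, List.tail_cons]
    rw [toDigits_two, binDigits_eq_bitsP k hk0]
  have e2 : PySem.Int.floordiv ((('b' :: bitsP k ℓ).length : Int) + 7) 8 * 8 = ((8 * C : Nat) : Int) := by
    have h1 : ((('b' :: bitsP k ℓ).length : Int) + 7) = ((ℓ + 8 : Nat) : Int) := by
      simp [length_bitsP]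
      ring
    rw [h1, show (8:Int) = ((8:Nat):Int) by norm_num, PySem.Int.floordiv_natCast]
    push_cast
    omega
  have e3 : PySem.Chars.zfill ('b' :: bitsP k ℓ) ((8 * C : Nat) : Int)
      = List.replicate p '0' ++ 'b' :: bitsP k ℓ := by
    rw [zfill_nosign _ _ (by simp) ⟨by simp, by simp⟩]
    rw [Int.toNat_natCast]
    congr 2
    simp [length_bitsP]
    omega
  have elen : (List.replicate p '0' ++ 'b' :: bitsP k ℓ).length = 8 * C := by
    simp [length_bitsP]
    omega
  have htake8 : (List.replicate p '0' ++ 'b' :: bitsP k ℓ).take 8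
      = List.replicate p '0' ++ 'b' :: bitsP (k / 2 ^ (ℓ - (7 - p))) (7 - p) := by
    rw [List.take_append, List.take_replicate, Nat.min_eq_right (by omega : p ≤ 8)]
    congr 1
    rw [show (8 - (List.replicate p '0').length) = (7 - p) + 1 by simp; omega]
    rw [List.take_succ_cons]
    congr 1
    rw [show ℓ = (7 - p) + (ℓ - (7 - p)) by omega, bitsP_split]
    rw [List.take_left' (length_bitsP _ _)]
    rw [show 7 - p + (ℓ - (7 - p)) - (7 - p) = ℓ - (7 - p) by omega]
  have hx : k / 2 ^ (ℓ - (7 - p)) < 2 ^ (7 - p) := by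
    rw [Nat.div_lt_iff_lt_mul (by positivity)]
    calc k < 2 ^ ℓ := hnl
      _ = 2 ^ (7 - p) * 2 ^ (ℓ - (7 - p)) := by rw [← pow_add]; congr 1; omega
  have ecnt : (if (0:Int) < ((8 * C : Nat) : Int) then ((((8 * C : Nat) : Int) - 0 + 8 - 1) / 8).toNat else 0) = C := by
    rw [if_pos (by push_cast; omega)]
    push_cast
    omega
  obtain ⟨C', hC'⟩ : ∃ C', C = C' + 1 := ⟨C - 1, by omega⟩
  have hp1 : p ≠ 1 := by
    rw [← hbl] at h6
    omega
  rw [int_to_8bit_text]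
  simp only [e1, e2, e3, elen]
  rw [PySem.List.pyRange_of_pos _ _ (by norm_num : (0:Int) < 8)]
  rw [ecnt, List.foldl_map, hC', List.range_succ_eq_map, List.foldl_cons]
  have h0 : (0:Int) + 8 * (((0:Nat)) : Int) = ((0:Nat) : Int) := by norm_num
  rw [h0, pyChunkStep, slice8, List.drop_zero, htake8]
  rw [parseBad p (by omega) hp1 _ hx]
  rw [List.foldl_map]
  rw [foldl_chunk_none]

theorem main_negD (m : Int) (hm : m < 0) (h6 : PySem.Int.bitLength m % 8 = 6) :
    ∃ v rest, 32 ≤ v ∧ v < 64 ∧ int_to_8bit_text m = String.ofList (Char.ofNat v :: rest) := by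
  have hk0 : 0 < m.natAbs := by omega
  set k := m.natAbs with hkdef
  have hmk : ((k : Nat) : Int) = -m := by omega
  have hbl : PySem.Int.bitLength (k : Int) = PySem.Int.bitLength m := by
    rw [hmk, PySem.Int.bitLength_neg]
  set ℓ := PySem.Int.bitLength (k : Int) with hldef
  have hnl : k < 2 ^ ℓ := by
    have := PySem.Int.lt_two_pow_bitLength (k : Int)
    simpa using this
  have hlpos : 0 < ℓ := by
    by_contra h
    have : ℓ = 0 := by omega
    rw [this] at hnl
    omega
  have hnge : 2 ^ (ℓ - 1) ≤ k := by
    have := PySem.Int.two_pow_bitLength_le (k : Int) (by exact_mod_cast (by omega : k ≠ 0))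
    simpa using this
  set C := (ℓ + 8) / 8 with hCdef
  have hC1 : 1 ≤ C := by omega
  set p := 8 * C - (ℓ + 1) with hpdef
  have hp7 : p ≤ 7 := by omega
  have hple : 7 - p ≤ ℓ := by omega
  have e0 : PySem.Int.toBinChars0b m = '-' :: '0' :: 'b' :: Nat.toDigits 2 k := by
    rw [PySem.Int.toBinChars0b, if_pos hm]
  have e1 : PySem.List.slice (PySem.Int.toBinChars0b m) (some 2) none = 'b' :: bitsP k ℓ := by
    rw [e0, PySem.List.slice_from _ (by norm_num : (0:Int) ≤ 2)]
    show List.drop 2 _ = _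
    rw [List.drop_succ_cons, List.drop_one, List.tail_cons]
    rw [toDigits_two, binDigits_eq_bitsP k hk0]
  have e2 : PySem.Int.floordiv ((('b' :: bitsP k ℓ).length : Int) + 7) 8 * 8 = ((8 * C : Nat) : Int) := by
    have h1 : ((('b' :: bitsP k ℓ).length : Int) + 7) = ((ℓ + 8 : Nat) : Int) := by
      simp [length_bitsP]
      ring
    rw [h1, show (8:Int) = ((8:Nat):Int) by norm_num, PySem.Int.floordiv_natCast]
    push_cast
    omega
  have e3 : PySem.Chars.zfill ('b' :: bitsP k ℓ) ((8 * C : Nat) : Int)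
      = List.replicate p '0' ++ 'b' :: bitsP k ℓ := by
    rw [zfill_nosign _ _ (by simp) ⟨by simp, by simp⟩]
    rw [Int.toNat_natCast]
    congr 2
    simp [length_bitsP]
    omega
  have elen : (List.replicate p '0' ++ 'b' :: bitsP k ℓ).length = 8 * C := by
    simp [length_bitsP]
    omega
  have htake8 : (List.replicate p '0' ++ 'b' :: bitsP k ℓ).take 8
      = List.replicate p '0' ++ 'b' :: bitsP (k / 2 ^ (ℓ - (7 - p))) (7 - p) := by
    rw [List.take_append, List.take_replicate, Nat.min_eq_right (by omega : p ≤ 8)]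
    congr 1
    rw [show (8 - (List.replicate p '0').length) = (7 - p) + 1 by simp; omega]
    rw [List.take_succ_cons]
    congr 1
    rw [show ℓ = (7 - p) + (ℓ - (7 - p)) by omega, bitsP_split]
    rw [List.take_left' (length_bitsP _ _)]
    rw [show 7 - p + (ℓ - (7 - p)) - (7 - p) = ℓ - (7 - p) by omega]
  have hx : k / 2 ^ (ℓ - (7 - p)) < 2 ^ (7 - p) := by
    rw [Nat.div_lt_iff_lt_mul (by positivity)]
    calc k < 2 ^ ℓ := hnl
      _ = 2 ^ (7 - p) * 2 ^ (ℓ - (7 - p)) := by rw [← pow_add]; congr 1; omega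
  have ecnt : (if (0:Int) < ((8 * C : Nat) : Int) then ((((8 * C : Nat) : Int) - 0 + 8 - 1) / 8).toNat else 0) = C := by
    rw [if_pos (by push_cast; omega)]
    push_cast
    omega
  obtain ⟨C', hC'⟩ : ∃ C', C = C' + 1 := ⟨C - 1, by omega⟩
  have hl6 : ℓ % 8 = 6 := by rw [hbl]; exact h6
  have hp1 : p = 1 := by omega
  have hl2 : ℓ = 8 * C' + 6 := by omega
  set v := k / 2 ^ (ℓ - 6) with hvdef
  set k2 := k % 2 ^ (ℓ - 6) with hk2def
  have hv64 : v < 64 := by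
    rw [hvdef, Nat.div_lt_iff_lt_mul (by positivity)]
    calc k < 2 ^ ℓ := hnl
      _ = 64 * 2 ^ (ℓ - 6) := by rw [show (64:Nat) = 2^6 by norm_num, ← pow_add]; congr 1; omega
  have hv32 : 32 ≤ v := by
    rw [hvdef, Nat.le_div_iff_mul_le (by positivity)]
    calc (32:Nat) * 2 ^ (ℓ - 6) = 2 ^ (ℓ - 1) := by
          rw [show (32:Nat) = 2^5 by norm_num, ← pow_add]; congr 1; omega
      _ ≤ k := hnge
  refine ⟨v, bytesBE k2 C', hv32, hv64, ?_⟩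
  rw [int_to_8bit_text]
  simp only [e1, e2, e3, elen]
  rw [PySem.List.pyRange_of_pos _ _ (by norm_num : (0:Int) < 8)]
  rw [ecnt, List.foldl_map, hC', List.range_succ_eq_map, List.foldl_cons]
  have h0 : (0:Int) + 8 * (((0:Nat)) : Int) = ((0:Nat) : Int) := by norm_num
  rw [h0, pyChunkStep, slice8, List.drop_zero, htake8, hp1]
  have h76 : 7 - 1 = 6 := rfl
  rw [h76] at *
  have hchunk : List.replicate 1 '0' ++ 'b' :: bitsP (k / 2 ^ (ℓ - 6)) 6
      = '0' :: 'b' :: bitsP v 6 := by rw [hvdef]; rfl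
  rw [hchunk, parse6 v hv64]
  have hsplitk : bitsP k ℓ = bitsP v 6 ++ bitsP k2 (8 * C') := by
    rw [show ℓ = 6 + (ℓ - 6) by omega, bitsP_split, hvdef, hk2def]
    congr 2
    omega
  have hbits : List.replicate 1 '0' ++ 'b' :: bitsP k ℓ
      = ('0' :: 'b' :: bitsP v 6) ++ (bitsP k2 (8 * C') ++ []) := by
    rw [hsplitk]
    simp
  rw [List.foldl_map]
  have hfun : (fun (acc : Option (List Char)) (kk : Nat) =>
        pyChunkStep (List.replicate 1 '0' ++ 'b' :: bitsP k ℓ) acc (0 + 8 * ((Nat.succ kk : Nat) : Int)))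
      = (fun (acc : Option (List Char)) (kk : Nat) =>
        pyChunkStep (('0' :: 'b' :: bitsP v 6) ++ (bitsP k2 (8 * C') ++ [])) acc ((8:Int) + 8 * (kk : Int))) := by
    funext acc kk
    rw [hbits]
    congr 1
    push_cast
    ring
  rw [hfun]
  have hk2lt : k2 < 2 ^ (8 * C') := by
    rw [hk2def, hl2]
    exact Nat.mod_lt _ (by positivity)
  rw [fold_pref C' k2 8 ('0' :: 'b' :: bitsP v 6) [] _ hk2lt (by simp [length_bitsP])]
  simp

-- ===== VERDICT (by name: the statement is the Claim_ definition above) =====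
theorem int_to_8bit_text_spec : Claim_unchanged_int_to_8bit_text := by
  intro m _
  unfold Spec_int_to_8bit_text
  intro hD
  rcases lt_trichotomy m 0 with hm | hm | hm
  · have h6 : PySem.Int.bitLength m % 8 ≠ 6 := fun h => hD ⟨hm, h⟩
    rw [main_neg m hm h6]
    simp [int_to_8bit_text_alt, hm]
  · subst hm; decide
  · exact main_pos m hm

theorem int_to_8bit_text_changed : Claim_changed_int_to_8bit_text := by
  unfold Claim_changed_int_to_8bit_text; decide

theorem int_to_8bit_text_tight : Claim_exact_int_to_8bit_text := by
  intro m _ hD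
  obtain ⟨hm, h6⟩ := hD
  obtain ⟨v, rest, hv32, hv64, hA⟩ := main_negD m hm h6
  rw [hA]
  have hB : int_to_8bit_text_alt m = "Cannot decode as 8-bit ASCII" := by
    simp [int_to_8bit_text_alt, hm]
  rw [hB]
  intro h
  have h' := congrArg String.toList h
  rw [String.toList_ofList] at h'
  have hC : ("Cannot decode as 8-bit ASCII").toList = 'C' :: "annot decode as 8-bit ASCII".toList := rfl
  rw [hC] at h'
  have hhead : Char.ofNat v = 'C' := (List.cons.injEq _ _ _ _ ▸ h').1
  have : ∀ w, w < 64 → Char.ofNat w ≠ 'C' := by decide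
  exact this v hv64 hhead
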